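-- pv_equiv track=rewrite | github.com/ericsyc/leetcode | Python/434 Number of Segments in a String.py | countSegments
-- ===== SOURCE A (Python) =====
-- def countSegments(s):
--     """
--     :type s: str
--     :rtype: int
--     """
--     i=0
--     count=0
--     while i < len(s) and s[i] == ' ':
--         i += 1
--     while i<len(s):
--         while i<len(s) and s[i] != ' ':
--             i+=1
--         count+=1
--         while i<len(s) and s[i]==' ':
--             i+=1
--
--     return count
-- ===== SOURCE B (Python) =====
-- def countSegments(s):
--     return len([w for w in s.split(' ') if w])
-- ===== Notes on version B (the rewrite author's own statement) =====
-- stated objective: idiomatic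
-- what changed: Replaced A's manual index scan with nested run-consuming while loops by a staged library decomposition: split the string on the single-space separator into pieces, then count the nonempty pieces.
import Mathlib
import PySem

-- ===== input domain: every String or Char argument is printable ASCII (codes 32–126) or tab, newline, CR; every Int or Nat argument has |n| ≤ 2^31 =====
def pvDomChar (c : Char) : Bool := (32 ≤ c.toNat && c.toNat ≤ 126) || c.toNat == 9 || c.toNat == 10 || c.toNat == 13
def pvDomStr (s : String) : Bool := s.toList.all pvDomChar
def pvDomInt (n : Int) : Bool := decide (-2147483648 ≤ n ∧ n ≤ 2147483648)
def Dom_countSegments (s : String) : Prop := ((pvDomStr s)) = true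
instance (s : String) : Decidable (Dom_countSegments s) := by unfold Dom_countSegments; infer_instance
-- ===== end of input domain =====

-- Header: B replaces A's manual index scan with nested run-consuming while loops by a staged library decomposition — split on ' ', then count the nonempty pieces (idiomatic; same return value).


-- ===== PORT A =====
-- A's first while loop: skip leading spaces (advances i past ' ' chars; here: drop them)
def skipSp : List Char → List Char
  | [] => []
  | c :: t => if c = ' ' then skipSp t else c :: t

-- A's inner while loop: advance i past the non-space run
def skipNon : List Char → List Char
  | [] => []
  | c :: t => if c ≠ ' ' then skipNon t else c :: t

theorem skipSp_len_le (l : List Char) : (skipSp l).length ≤ l.length := by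
  induction l with
  | nil => simp [skipSp]
  | cons c t ih => simp only [skipSp]; split <;> simp <;> omega

theorem skipNon_len_le (l : List Char) : (skipNon l).length ≤ l.length := by
  induction l with
  | nil => simp [skipNon]
  | cons c t ih => simp only [skipNon]; split <;> simp <;> omega

theorem aLoop_dec (c : Char) (t : List Char) :
    (skipSp (skipNon (c :: t))).length < (c :: t).length := by
  by_cases hc : c = ' '
  · subst hc
    have h1 := skipSp_len_le t
    have e1 : skipNon (' ' :: t) = ' ' :: t := by simp [skipNon]
    have e2 : skipSp (' ' :: t) = skipSp t := by simp [skipSp]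
    rw [e1, e2]
    simp only [List.length_cons]
    omega
  · have h1 := skipSp_len_le (skipNon t)
    have h2 := skipNon_len_le t
    simp only [skipNon, if_pos hc, List.length_cons]
    omega

-- A's outer while loop: consume a word, count it, skip the following spaces
def aLoop : List Char → Int
  | [] => 0
  | c :: t => 1 + aLoop (skipSp (skipNon (c :: t)))
termination_by l => l.length
decreasing_by exact aLoop_dec c t

def countSegments (s : String) : Int := aLoop (skipSp s.toList)

-- ===== PORT B =====
-- Source B: return len([w for w in s.split(' ') if w]); s.split(' ') is PySem.Chars.splitOn on the char list
def countSegments_alt (s : String) : Int :=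
  (((PySem.Chars.splitOn s.toList [' ']).filter (fun w => w ≠ [])).length : Int)

-- ===== PRECONDITION & SPEC =====
def Spec_countSegments (s : String) (out : Int) : Prop := out = countSegments_alt s
instance (s : String) (out : Int) : Decidable (Spec_countSegments s out) := by unfold Spec_countSegments; infer_instance

-- ===== CLAIM (what is proved, stated in full; the proofs are below) =====
def Claim_equal_countSegments : Prop := ∀ (s : String), Dom_countSegments s → Spec_countSegments s (countSegments s)

-- ===== LEMMAS AND PROOFS =====

-- simple structural characterisation of split-by-one-space
def sp : List Char → List (List Char)
  | [] => [[]]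
  | c :: t => if c = ' ' then [] :: sp t else (c :: (sp t).headI) :: (sp t).tail

theorem sp_ne_nil (l : List Char) : sp l ≠ [] := by
  cases l with
  | nil => simp [sp]
  | cons c t => simp only [sp]; split <;> simp

theorem headI_cons_tail (l : List Char) : (sp l).headI :: (sp l).tail = sp l := by
  cases h : sp l with
  | nil => exact absurd h (sp_ne_nil l)
  | cons a u => simp

theorem splitOn_go_spec : ∀ (fuel : ℕ) (l cur : List Char) (acc : List (List Char)),
    l.length ≤ fuel →
    PySem.Chars.splitOn.go [' '] fuel l cur acc
      = acc.reverse ++ (cur.reverse ++ (sp l).headI) :: (sp l).tail := by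
  intro fuel
  induction fuel with
  | zero =>
    intro l cur acc hl
    have : l = [] := List.length_eq_zero_iff.mp (Nat.le_zero.mp hl)
    subst this
    simp [PySem.Chars.splitOn.go, sp, List.reverse_cons]
  | succ n ih =>
    intro l cur acc hl
    cases l with
    | nil => simp [PySem.Chars.splitOn.go, sp, List.reverse_cons]
    | cons c t =>
      by_cases hc : c = ' '
      · subst hc
        have hpre : List.isPrefixOf [' '] (' ' :: t) = true := by
          simp [List.isPrefixOf]
        rw [PySem.Chars.splitOn.go]
        simp only [hpre, if_true, List.length_cons, List.length_nil, List.drop_succ_cons,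
          List.drop_zero]
        rw [ih t [] (cur.reverse :: acc) (by simpa using Nat.le_of_succ_le_succ hl)]
        have hsp : sp (' ' :: t) = [] :: sp t := by simp [sp]
        rw [hsp]
        simp only [List.reverse_cons, List.reverse_nil, List.nil_append,
          List.tail_cons, List.append_assoc, List.cons_append]
        rw [headI_cons_tail]
        simp
      · have hpre : List.isPrefixOf [' '] (c :: t) = false := by
          simp [List.isPrefixOf]; exact fun h => absurd h.symm hc
        rw [PySem.Chars.splitOn.go]
        simp only [hpre]
        rw [ih t (c :: cur) acc (by simpa using Nat.le_of_succ_le_succ hl)]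
        simp [sp, hc]

theorem splitOn_eq_sp (l : List Char) : PySem.Chars.splitOn l [' '] = sp l := by
  unfold PySem.Chars.splitOn
  rw [splitOn_go_spec (l.length + 1) l [] [] (by omega)]
  simpa using headI_cons_tail l

-- flag-style rendering of the count of nonempty pieces, used to connect sp to aLoop
def bCount (prev : Bool) : List Char → Int
  | [] => 0
  | c :: t => (if c ≠ ' ' ∧ prev then 1 else 0) + bCount (c == ' ') t

theorem sp_counts (l : List Char) :
    (((sp l).filter (fun w => w ≠ [])).length : Int) = bCount true l ∧
    (((sp l).tail.filter (fun w => w ≠ [])).length : Int) = bCount false l := by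
  induction l with
  | nil => simp [sp, bCount]
  | cons c t ih =>
    by_cases hc : c = ' '
    · subst hc
      constructor
      · simpa [sp, bCount] using ih.1
      · simpa [sp, bCount] using ih.1
    · have hb : (c == ' ') = false := by simp [hc]
      have hsp : sp (c :: t) = (c :: (sp t).headI) :: (sp t).tail := by
        simp [sp, hc]
      constructor
      · rw [hsp, List.filter_cons_of_pos (by simp)]
        simp only [bCount, hb, List.length_cons]
        rw [if_pos (show c ≠ ' ' ∧ True from ⟨hc, trivial⟩), ← ih.2]
        push_cast
        ring
      · rw [hsp, List.tail_cons]
        simp only [bCount, hb, if_neg (by simp : ¬(c ≠ ' ' ∧ false = true))]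
        simpa using ih.2

theorem bCount_skipSp (l : List Char) : bCount true (skipSp l) = bCount true l := by
  induction l with
  | nil => rfl
  | cons c t ih =>
    by_cases hc : c = ' '
    · simp [skipSp, bCount, hc, ih]
    · simp [skipSp, hc]

theorem bCount_skipNon (l : List Char) : bCount false (skipNon l) = bCount false l := by
  induction l with
  | nil => rfl
  | cons c t ih =>
    by_cases hc : c = ' '
    · simp [skipNon, hc]
    · have hb : (c == ' ') = false := by simp [hc]
      simp [skipNon, bCount, hc, ih, hb]

theorem bCount_false_true_skipNon (l : List Char) :
    bCount false (skipNon l) = bCount true (skipNon l) := by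
  induction l with
  | nil => rfl
  | cons c t ih =>
    by_cases hc : c = ' '
    · simp [skipNon, bCount, hc]
    · simpa [skipNon, hc] using ih

theorem skipSp_head_ne (l : List Char) (c : Char) (t : List Char)
    (h : skipSp l = c :: t) : c ≠ ' ' := by
  induction l with
  | nil => simp [skipSp] at h
  | cons d u ih =>
    by_cases hd : d = ' '
    · exact ih (by simpa [skipSp, hd] using h)
    · simp [skipSp, hd] at h
      rcases h with ⟨h1, _⟩
      exact h1 ▸ hd

theorem main_equiv : ∀ (n : ℕ) (l : List Char), l.length ≤ n →
    aLoop (skipSp l) = bCount true l := by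
  intro n
  induction n with
  | zero =>
    intro l hl
    have : l = [] := List.length_eq_zero_iff.mp (Nat.le_zero.mp hl)
    subst this; simp [skipSp, aLoop, bCount]
  | succ n ih =>
    intro l hl
    cases hsk : skipSp l with
    | nil =>
      rw [← bCount_skipSp, hsk]; simp [aLoop, bCount]
    | cons c t =>
      have hc : c ≠ ' ' := skipSp_head_ne l c t hsk
      have hlen : (c :: t).length ≤ l.length := hsk ▸ skipSp_len_le l
      rw [aLoop]
      have hnon : skipNon (c :: t) = skipNon t := by simp [skipNon, hc]
      rw [hnon, ih (skipNon t) (le_trans (skipNon_len_le _) (by simp at hlen; omega))]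
      rw [← bCount_skipSp l, hsk]
      have hb : (c == ' ') = false := by simp [hc]
      simp only [bCount, and_true, hb]
      rw [if_pos hc, ← bCount_false_true_skipNon t, bCount_skipNon t]

-- ===== VERDICT (by name: the statement is the Claim_ definition above) =====
theorem countSegments_spec : Claim_equal_countSegments := by
  intro s _
  unfold Spec_countSegments countSegments countSegments_alt
  rw [main_equiv s.toList.length s.toList le_rfl, splitOn_eq_sp]
  exact (sp_counts s.toList).1.symm
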